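-- pv_equiv track=rewrite | github.com/taurinrobinson-wq/saoriverse-console | tools/clean_openstax_lexicon.py | clean_lexicon
-- ===== SOURCE A (Python) =====
-- from typing import Set
--
-- def normalize_head(s: str) -> str:
--     return s.replace("_", " ").lower()
--
-- def should_remove(head: str, remove_set: Set[str]) -> bool:
--     # Remove if exact match or contains any remove token
--     nh = normalize_head(head)
--     if nh in remove_set:
--         return True
--     for token in remove_set:
--         if token in nh:
--             return True
--     # also remove very short heads or those with digits/punctuation only
--     if len(nh) <= 1:
--         return True
--     return False
--
-- def clean_lexicon(payload: dict, remove_tokens: Set[str], min_frequency: int = 1):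
--     signals = payload.get("signals", {})
--     kept = {}
--     removed = []
--     for head, info in signals.items():
--         if should_remove(head, remove_tokens):
--             removed.append(head)
--             continue
--         if info.get("frequency", 0) < min_frequency:
--             removed.append(head)
--             continue
--         kept[head] = info
--     out = {"signals": kept}
--     return out, removed
-- ===== SOURCE B (Python) =====
-- def clean_lexicon(payload, remove_tokens, min_frequency=1):
--     signals = payload.get("signals", {})
--     remove_set = set(remove_tokens)
--     kept = {}
--     removed = []
--     for head, info in signals.items():
--         nh = head.replace("_", " ").lower()
--         n = len(nh)
--         # Instead of searching each remove token inside the head, enumerate the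
--         # head's own substrings once and hash-probe them against the token set.
--         doomed = n <= 1 or any(
--             nh[i:j] in remove_set
--             for i in range(n + 1) for j in range(i, n + 1))
--         if doomed or info.get("frequency", 0) < min_frequency:
--             removed.append(head)
--         else:
--             kept[head] = info
--     return {"signals": kept}, removed
-- ===== Notes on version B (the rewrite author's own statement) =====
-- stated objective: alternative
-- what changed: A decides removal by searching every remove token as a substring inside each normalized head; B never scans the token set per head: it enumerates each head's substrings once and hash-probes them against a set built from the remove tokens, so the per-head cost is independent of the number of tokens.
import Mathlib
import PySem

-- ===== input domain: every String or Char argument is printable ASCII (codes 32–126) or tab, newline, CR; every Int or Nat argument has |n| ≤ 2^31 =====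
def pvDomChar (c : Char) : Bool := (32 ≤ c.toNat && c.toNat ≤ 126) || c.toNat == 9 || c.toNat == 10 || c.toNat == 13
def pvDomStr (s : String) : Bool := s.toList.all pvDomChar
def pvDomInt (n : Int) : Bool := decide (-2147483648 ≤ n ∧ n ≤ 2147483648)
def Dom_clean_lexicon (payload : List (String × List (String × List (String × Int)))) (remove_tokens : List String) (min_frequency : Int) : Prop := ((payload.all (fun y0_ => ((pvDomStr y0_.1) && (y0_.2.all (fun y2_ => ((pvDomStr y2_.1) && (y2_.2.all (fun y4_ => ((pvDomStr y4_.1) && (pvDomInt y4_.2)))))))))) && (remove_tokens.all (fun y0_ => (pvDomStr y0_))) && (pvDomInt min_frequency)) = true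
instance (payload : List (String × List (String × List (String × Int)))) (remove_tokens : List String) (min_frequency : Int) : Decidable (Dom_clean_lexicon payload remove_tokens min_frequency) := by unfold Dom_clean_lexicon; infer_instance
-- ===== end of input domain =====

-- ===== PORT A =====
-- B replaces A's per-token substring search inside each head by enumerating the head's substrings and probing them in a set of the remove tokens; same results, alternative algorithm (return value only; no argument is mutated).
def pvNorm (s : String) : String := PySem.Str.lower (PySem.Str.replace s "_" " ")

-- A's should_remove: exact-match check, then the token loop with early return (= List.any), then the length test
def pvShouldRemove (head : String) (remove_set : List String) : Bool :=
  let nh := pvNorm head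
  if remove_set.contains nh then true
  else if remove_set.any (fun token => PySem.Str.isIn token nh) then true
  else if PySem.Str.len nh ≤ 1 then true
  else false

def clean_lexicon (payload : List (String × List (String × List (String × Int)))) (remove_tokens : List String) (min_frequency : Int) : (List (String × List (String × List (String × Int)))) × List String :=
  let signals := PySem.Dict.ofList ((PySem.Dict.ofList payload).getD "signals" [])
  let st := signals.items.foldl (fun (st : PySem.Dict String (List (String × Int)) × List String) hi =>
      if pvShouldRemove hi.1 remove_tokens then (st.1, st.2 ++ [hi.1])
      else
        let info := PySem.Dict.ofList hi.2
        if info.getD "frequency" 0 < min_frequency then (st.1, st.2 ++ [hi.1])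
        else (st.1.insert hi.1 info.items, st.2))
    (PySem.Dict.empty, [])
  ([("signals", st.1.items)], st.2)

-- ===== PORT B =====
-- B's per-head test: all substrings nh[i:j] probed against the token set (no scan of the tokens)
def pvAnySub (nh : String) (remove_set : PySem.Set String) : Bool :=
  (PySem.List.pyRange 0 ((PySem.Str.len nh : Int) + 1) 1).any (fun i =>
    (PySem.List.pyRange i ((PySem.Str.len nh : Int) + 1) 1).any (fun j =>
      PySem.Set.contains remove_set (PySem.Str.slice nh (some i) (some j))))

def clean_lexicon_alt (payload : List (String × List (String × List (String × Int)))) (remove_tokens : List String) (min_frequency : Int) : (List (String × List (String × List (String × Int)))) × List String :=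
  let signals := PySem.Dict.ofList ((PySem.Dict.ofList payload).getD "signals" [])
  let remove_set := PySem.Set.ofList remove_tokens
  let st := signals.items.foldl (fun (st : PySem.Dict String (List (String × Int)) × List String) hi =>
      let nh := PySem.Str.lower (PySem.Str.replace hi.1 "_" " ")
      let doomed := PySem.Str.len nh ≤ 1 ∨ pvAnySub nh remove_set = true
      if doomed ∨ (PySem.Dict.ofList hi.2).getD "frequency" 0 < min_frequency
      then (st.1, st.2 ++ [hi.1])
      else (st.1.insert hi.1 (PySem.Dict.ofList hi.2).items, st.2))
    (PySem.Dict.empty, [])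
  ([("signals", st.1.items)], st.2)

-- ===== PRECONDITION & SPEC =====
def Spec_clean_lexicon (payload : List (String × List (String × List (String × Int)))) (remove_tokens : List String) (min_frequency : Int) (out : (List (String × List (String × List (String × Int)))) × List String) : Prop := out = clean_lexicon_alt payload remove_tokens min_frequency
instance (payload : List (String × List (String × List (String × Int)))) (remove_tokens : List String) (min_frequency : Int) (out : (List (String × List (String × List (String × Int)))) × List String) : Decidable (Spec_clean_lexicon payload remove_tokens min_frequency out) := by
  unfold Spec_clean_lexicon
  -- instance search times out on the deeply nested type; give the DecidableEq instance as an explicit term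
  exact @instDecidableEqProd _ _
    (@instDecidableEqList _ (@instDecidableEqProd _ _ instDecidableEqString
      (@instDecidableEqList _ (@instDecidableEqProd _ _ instDecidableEqString
        (@instDecidableEqList _ (@instDecidableEqProd _ _ instDecidableEqString Int.instDecidableEq))))))
    (@instDecidableEqList _ instDecidableEqString) _ _

-- ===== CLAIM (what is proved, stated in full; the proofs are below) =====
def Claim_equal_clean_lexicon : Prop := ∀ (payload : List (String × List (String × List (String × Int)))) (remove_tokens : List String) (min_frequency : Int), Dom_clean_lexicon payload remove_tokens min_frequency → Spec_clean_lexicon payload remove_tokens min_frequency (clean_lexicon payload remove_tokens min_frequency)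

-- ===== LEMMAS AND PROOFS =====

-- any substring-slice of nh is an infix of nh
lemma pvSliceInfix (nh : String) (i j : Int) (hi : 0 ≤ i) (hj : 0 ≤ j) :
    (PySem.Str.slice nh (some i) (some j)).toList <:+: nh.toList := by
  rw [PySem.Str.toList_slice, PySem.Chars.slice_eq_listSlice, PySem.List.slice_toNat _ hi hj]
  exact (List.take_prefix _ _).isInfix.trans (List.drop_suffix _ _).isInfix

-- B's substring-probing test equals A's token scan
lemma pvAnySub_eq_any (r : List String) (nh : String) :
    pvAnySub nh (PySem.Set.ofList r) = r.any (fun t => PySem.Str.isIn t nh) := by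
  apply Bool.eq_iff_iff.2
  unfold pvAnySub
  constructor
  · intro h
    rcases List.any_eq_true.1 h with ⟨i, hi, h2⟩
    rcases List.any_eq_true.1 h2 with ⟨j, hj, h3⟩
    rw [PySem.List.mem_pyRange_one] at hi hj
    have hmem : PySem.Str.slice nh (some i) (some j) ∈ r :=
      (PySem.Set.mem_ofList _ _).1 ((PySem.Set.contains_iff _ _).1 h3)
    exact List.any_eq_true.2 ⟨_, hmem,
      (PySem.Str.isIn_iff_infix _ _).2 (pvSliceInfix nh i j hi.1 (le_trans hi.1 hj.1))⟩
  · intro h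
    rcases List.any_eq_true.1 h with ⟨t, ht, hin⟩
    rcases (PySem.Str.isIn_iff_infix _ _).1 hin with ⟨s, u, hsu⟩
    have hlen : s.length + t.toList.length + u.length = nh.toList.length := by
      rw [← hsu]; simp; omega
    have hslice : PySem.Str.slice nh (some (s.length : Int))
        (some ((s.length : Int) + (t.toList.length : Int))) = t := by
      have : (PySem.Str.slice nh (some (s.length : Int))
          (some ((s.length : Int) + (t.toList.length : Int)))).toList = t.toList := by
        rw [PySem.Str.toList_slice, PySem.Chars.slice_eq_listSlice,
          PySem.List.slice_natCast_add, ← hsu]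
        rw [List.append_assoc, List.drop_left, List.take_left]
      exact String.toList_inj.1 this
    refine List.any_eq_true.2 ⟨(s.length : Int), ?_, List.any_eq_true.2
      ⟨(s.length : Int) + (t.toList.length : Int), ?_, ?_⟩⟩
    · rw [PySem.List.mem_pyRange_one]
      constructor
      · positivity
      · have : (PySem.Str.len nh : Int) = (nh.toList.length : Int) := by
          simp [PySem.Str.len_eq]
        omega
    · rw [PySem.List.mem_pyRange_one]
      have : (PySem.Str.len nh : Int) = (nh.toList.length : Int) := by
        simp [PySem.Str.len_eq]
      omega
    · rw [hslice]
      exact (PySem.Set.contains_iff _ _).2 ((PySem.Set.mem_ofList _ _).2 ht)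

-- A's should_remove collapsed to B's per-head condition (the exact-match branch is subsumed: nh is its own substring)
lemma pvShouldRemove_eq (h : String) (r : List String) :
    pvShouldRemove h r =
      (decide (PySem.Str.len (pvNorm h) ≤ 1) || pvAnySub (pvNorm h) (PySem.Set.ofList r)) := by
  rw [pvAnySub_eq_any]
  unfold pvShouldRemove
  dsimp only
  have hself : r.contains (pvNorm h) = true →
      r.any (fun t => PySem.Str.isIn t (pvNorm h)) = true := fun hc =>
    List.any_eq_true.2 ⟨pvNorm h, List.mem_of_elem_eq_true (by simpa using hc),
      (PySem.Str.isIn_iff_infix _ _).2 (List.infix_refl _)⟩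
  split_ifs with h1 h2 h3
  · rw [hself (by simpa using h1), Bool.or_true]
  · rw [h2, Bool.or_true]
  · rw [decide_eq_true h3, Bool.true_or]
  · rw [Bool.eq_false_iff.2 h2, decide_eq_false h3, Bool.or_false]

-- ===== VERDICT (by name: the statement is the Claim_ definition above) =====
theorem clean_lexicon_spec : Claim_equal_clean_lexicon := by
  intro payload r mf _
  unfold Spec_clean_lexicon clean_lexicon clean_lexicon_alt
  dsimp only
  have hstep : (fun (st : PySem.Dict String (List (String × Int)) × List String)
      (hi : String × List (String × Int)) =>
      if pvShouldRemove hi.1 r then (st.1, st.2 ++ [hi.1])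
      else
        let info := PySem.Dict.ofList hi.2
        if info.getD "frequency" 0 < mf then (st.1, st.2 ++ [hi.1])
        else (st.1.insert hi.1 info.items, st.2)) =
      (fun (st : PySem.Dict String (List (String × Int)) × List String)
        (hi : String × List (String × Int)) =>
        let nh := PySem.Str.lower (PySem.Str.replace hi.1 "_" " ")
        let doomed := PySem.Str.len nh ≤ 1 ∨ pvAnySub nh (PySem.Set.ofList r) = true
        if doomed ∨ (PySem.Dict.ofList hi.2).getD "frequency" 0 < mf
        then (st.1, st.2 ++ [hi.1])
        else (st.1.insert hi.1 (PySem.Dict.ofList hi.2).items, st.2)) := by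
    funext st hi
    dsimp only
    have hnorm : PySem.Str.lower (PySem.Str.replace hi.1 "_" " ") = pvNorm hi.1 := rfl
    rw [hnorm]
    have hc := pvShouldRemove_eq hi.1 r
    by_cases hd : PySem.Str.len (pvNorm hi.1) ≤ 1 ∨ pvAnySub (pvNorm hi.1) (PySem.Set.ofList r) = true
    · have h1 : pvShouldRemove hi.1 r = true := by
        rw [hc]
        rcases hd with hd | hd
        · rw [decide_eq_true hd, Bool.true_or]
        · rw [hd, Bool.or_true]
      rw [if_pos h1, if_pos (Or.inl hd)]
    · rw [not_or] at hd
      have h1 : pvShouldRemove hi.1 r = false := by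
        rw [hc, decide_eq_false hd.1, Bool.false_or, Bool.eq_false_iff.2 hd.2]
      rw [if_neg (by rw [h1]; exact Bool.false_ne_true)]
      by_cases hf : (PySem.Dict.ofList hi.2).getD "frequency" 0 < mf
      · rw [if_pos hf, if_pos (Or.inr hf)]
      · rw [if_neg hf, if_neg (by rintro (hx | hx); exact hd.elim (fun a b => hx.elim a b); exact hf hx)]
  rw [hstep]
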